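-- pv_equiv track=rewrite | github.com/Lhamael/aprendendoProgramacao | aulas/estrutura_de_dados/atividades/revisao-seguindoDirecoes.py | folloingDirections
-- ===== SOURCE A (Python) =====
-- def folloingDirections(qtd, direcoes):
--     candy = [1, 1]
--     alperen = [0, 0]
--     for i in range(qtd):
--         if direcoes[i] == "L":
--             alperen[0] -= 1
--         elif direcoes[i] == "R":
--             alperen[0] += 1
--         elif direcoes[i] == "U":
--             alperen[1] += 1
--         else:
--             alperen[1] -= 1
--
--         if candy[0] == alperen[0] and candy[1] == alperen[1]:
--             return True
--
--     return False
-- ===== SOURCE B (Python) =====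
-- def folloingDirections(qtd, direcoes):
--     moves = [direcoes[i] for i in range(qtd)]
--
--     def hits(k):
--         pre = moves[:k]
--         cl, cr, cu = pre.count("L"), pre.count("R"), pre.count("U")
--         return cr - cl == 1 and cu - (k - cl - cr - cu) == 1
--
--     return any(hits(k) for k in range(1, qtd + 1))
-- ===== Notes on version B (the rewrite author's own statement) =====
-- stated objective: alternative
-- what changed: B keeps no position state at all: it materialises the first qtd moves, and for each prefix length k answers by letter counts (count('R')-count('L'), count('U')-(k-others)) of the slice moves[:k], returning any() of the (1,1) tests, instead of A's stateful step-by-step walk with early return.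
-- outside the precondition, e.g. on folloingDirections(3, ['R', 'U']): A returns True, B raises IndexError
import Mathlib
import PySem

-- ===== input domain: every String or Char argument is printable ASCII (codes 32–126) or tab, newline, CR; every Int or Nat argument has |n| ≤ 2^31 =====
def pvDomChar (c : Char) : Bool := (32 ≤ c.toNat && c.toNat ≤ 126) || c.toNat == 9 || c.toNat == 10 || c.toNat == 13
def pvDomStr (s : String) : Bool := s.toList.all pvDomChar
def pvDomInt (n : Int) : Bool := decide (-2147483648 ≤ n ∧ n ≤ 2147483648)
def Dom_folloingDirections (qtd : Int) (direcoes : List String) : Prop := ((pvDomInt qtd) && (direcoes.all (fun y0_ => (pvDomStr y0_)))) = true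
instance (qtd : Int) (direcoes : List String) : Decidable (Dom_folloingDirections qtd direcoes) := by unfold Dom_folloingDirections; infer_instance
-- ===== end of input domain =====

-- B replaces A's stateful walk (mutable position, early return) with a stateless reformulation:
-- the position after k moves is recovered arithmetically from the letter counts of the prefix
-- moves[:k], and the answer is any() of the (1,1) tests over all prefixes; alternative decomposition.

-- ===== PORT A =====
-- the if/elif chain updating alperen
def pvStepA (s : String) (p : Int × Int) : Int × Int :=
  if s = "L" then (p.1 - 1, p.2)
  else if s = "R" then (p.1 + 1, p.2)
  else if s = "U" then (p.1, p.2 + 1)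
  else (p.1, p.2 - 1)

-- the 'for i in range(qtd)' loop with the candy comparison and early return
def pvGoA : List Int → List String → Int × Int → Bool
  | [], _, _ => false
  | i :: rest, d, p =>
      let p' := pvStepA (PySem.List.pyGetD d i "") p
      if p'.1 = 1 ∧ p'.2 = 1 then true else pvGoA rest d p'

def folloingDirections (qtd : Int) (direcoes : List String) : Bool :=
  pvGoA (PySem.List.pyRange 0 qtd 1) direcoes (0, 0)

-- ===== PORT B =====
-- moves = [direcoes[i] for i in range(qtd)]
def pvMovesB (qtd : Int) (direcoes : List String) : List String :=
  (PySem.List.pyRange 0 qtd 1).map (fun i => PySem.List.pyGetD direcoes i "")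

-- hits(k): the counting test on the prefix moves[:k]
def pvHitB (moves : List String) (k : Int) : Bool :=
  let pre := PySem.List.slice moves (some 0) (some k)
  let cl : Int := PySem.List.count pre "L"
  let cr : Int := PySem.List.count pre "R"
  let cu : Int := PySem.List.count pre "U"
  (cr - cl == 1) && (cu - (k - cl - cr - cu) == 1)

-- any(hits(k) for k in range(1, qtd + 1))
def folloingDirections_alt (qtd : Int) (direcoes : List String) : Bool :=
  (PySem.List.pyRange 1 (qtd + 1) 1).any (fun k => pvHitB (pvMovesB qtd direcoes) k)

-- ===== PRECONDITION & SPEC =====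
-- Pre_ excludes qtd > len(direcoes): there Python A raises IndexError when the walk misses (1,1)
-- early, and B (which materialises all qtd moves up front) raises IndexError even when A's early
-- return still produced True — see the cited example.
def Pre_folloingDirections (qtd : Int) (direcoes : List String) : Prop :=
  qtd ≤ (direcoes.length : Int)
instance (qtd : Int) (direcoes : List String) : Decidable (Pre_folloingDirections qtd direcoes) := by unfold Pre_folloingDirections; infer_instance

def pvWitness_folloingDirections : Int × List String := (3, ["R", "D", "U"])

def Spec_folloingDirections (qtd : Int) (direcoes : List String) (out : Bool) : Prop := out = folloingDirections_alt qtd direcoes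
instance (qtd : Int) (direcoes : List String) (out : Bool) : Decidable (Spec_folloingDirections qtd direcoes out) := by unfold Spec_folloingDirections; infer_instance

-- ===== CLAIM (what is proved, stated in full; the proofs are below) =====
def Claim_equal_folloingDirections : Prop := ∀ (qtd : Int) (direcoes : List String), Dom_folloingDirections qtd direcoes → Pre_folloingDirections qtd direcoes → Spec_folloingDirections qtd direcoes (folloingDirections qtd direcoes)

-- ===== LEMMAS AND PROOFS =====

-- A's loop, abstracted over the list of move strings it actually reads
def pvARun : List String → Int × Int → Bool
  | [], _ => false
  | m :: t, p =>
      let p' := pvStepA m p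
      if p'.1 = 1 ∧ p'.2 = 1 then true else pvARun t p'

theorem pvGoA_eq_run (d : List String) (idxs : List Int) (p : Int × Int) :
    pvGoA idxs d p = pvARun (idxs.map (fun i => PySem.List.pyGetD d i "")) p := by
  induction idxs generalizing p with
  | nil => rfl
  | cons i rest ih => simp [pvGoA, pvARun, ih]

def pvPos (p : Int × Int) (l : List String) : Int × Int :=
  l.foldl (fun q m => pvStepA m q) p

-- position after a prefix, from its letter counts
theorem pvPos_counts (l : List String) (p : Int × Int) :
    pvPos p l = (p.1 + (l.count "R" : Int) - l.count "L",
                 p.2 + (l.count "U" : Int) - ((l.length : Int) - l.count "L" - l.count "R" - l.count "U")) := by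
  induction l generalizing p with
  | nil => simp [pvPos]
  | cons m t ih =>
      have h : pvPos p (m :: t) = pvPos (pvStepA m p) t := rfl
      rw [h, ih]
      by_cases hL : m = "L"
      · simp [pvStepA, hL, Prod.ext_iff]; omega
      · by_cases hR : m = "R"
        · simp [pvStepA, hR, Prod.ext_iff]; omega
        · by_cases hU : m = "U"
          · simp [pvStepA, hU, Prod.ext_iff]; omega
          · simp [pvStepA, hL, hR, hU, Prod.ext_iff]; omega

theorem pvARun_eq_anyPrefix (ms : List String) (p : Int × Int) :
    pvARun ms p = (List.range ms.length).any (fun j => pvPos p (ms.take (j + 1)) == (1, 1)) := by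
  induction ms generalizing p with
  | nil => rfl
  | cons m t ih =>
      have e : pvARun (m :: t) p
          = if (pvStepA m p).1 = 1 ∧ (pvStepA m p).2 = 1 then true else pvARun t (pvStepA m p) := rfl
      have e1 : pvPos p ((m :: t).take (0 + 1)) = pvStepA m p := rfl
      rw [e, List.length_cons, List.range_succ_eq_map, List.any_cons, List.any_map]
      split_ifs with h
      · have h0 : (pvPos p ((m :: t).take (0 + 1)) == ((1 : Int), (1 : Int))) = true := by
          rw [e1]; simp [Prod.ext_iff, h.1, h.2]
        rw [h0, Bool.true_or]
      · have h0 : (pvPos p ((m :: t).take (0 + 1)) == ((1 : Int), (1 : Int))) = false := by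
          rw [e1, beq_eq_false_iff_ne]
          exact fun hc => h ⟨by rw [hc], by rw [hc]⟩
        rw [h0, Bool.false_or, ih]
        exact PySem.List.any_congr_mem (fun j _ => rfl)

-- B's per-k test is the (1,1) test on the prefix position
theorem pvHitB_eq (ms : List String) (j : Nat) (hj : j < ms.length) :
    pvHitB ms (1 + (j : Int)) = (pvPos (0, 0) (ms.take (j + 1)) == ((1 : Int), (1 : Int))) := by
  have hk : (1 : Int) + (j : Int) = ((j + 1 : Nat) : Int) := by push_cast; ring
  have hslice : PySem.List.slice ms (some 0) (some (1 + (j : Int))) = ms.take (j + 1) := by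
    rw [hk]
    simpa using PySem.List.slice_to_natCast (xs := ms) (b := j + 1)
  have hlen : ((ms.take (j + 1)).length : Int) = 1 + (j : Int) := by
    rw [List.length_take]; omega
  rw [pvHitB, hslice, pvPos_counts]
  set pre := ms.take (j + 1) with hpre
  rw [Bool.eq_iff_iff]
  simp only [Bool.and_eq_true, beq_iff_eq, PySem.List.count_eq, Prod.ext_iff]
  constructor <;> intro h' <;> exact ⟨by omega, by omega⟩

theorem pv_main (qtd : Int) (direcoes : List String) :
    folloingDirections qtd direcoes = folloingDirections_alt qtd direcoes := by
  rw [folloingDirections, folloingDirections_alt, pvGoA_eq_run]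
  set ms := pvMovesB qtd direcoes with hms
  have hmap : (PySem.List.pyRange 0 qtd 1).map (fun i => PySem.List.pyGetD direcoes i "") = ms := rfl
  rw [hmap, pvARun_eq_anyPrefix]
  have h1 : ms.length = (qtd + 1 - 1).toNat := by
    simp [hms, pvMovesB, PySem.List.length_pyRange_one]
  have hr : PySem.List.pyRange 1 (qtd + 1) 1
      = (List.range ms.length).map (fun k : Nat => (1 : Int) + (k : Int)) := by
    rw [PySem.List.pyRange_one, h1]
  rw [hr, List.any_map]
  exact PySem.List.any_congr_mem
    (fun j hj => (pvHitB_eq ms j (List.mem_range.mp hj)).symm)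

-- ===== VERDICT (by name: the statement is the Claim_ definition above) =====
theorem folloingDirections_spec : Claim_equal_folloingDirections := by
  intro qtd direcoes _ _
  exact pv_main qtd direcoes
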